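-- pv_equiv track=rewrite | github.com/V0rtex101/CSC1015_Assignments | Assignment 6/calendar_month.py | week
-- ===== SOURCE A (Python) =====
-- def week(week_num, start_day, days_in_month):
--     """It outputs the given week of a month.
--     A dictionary is used to store the values of each week
--     The odd days are calculated and spaces are used to fill them before the
--     starting day of the month. The for loop then adds values to each week depending on if all
--     seven slots of the previous week have been filled before filling the next one.
--     Finally, the function output the week as a string.
--     """
--     weeks = {1: "", 2: "", 3: "", 4: "", 5: "", 6: ""}
--     j = 1
--     odd_days = start_day - 2
--     space = ''
--     space = space.rjust(2, ' ')
--     for i in range(days_in_month + odd_days + 1):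
--         if i <= odd_days:
--             weeks[j] += space + ' '
--         else:
--             weeks[j] += "{0:2d}".format(i - odd_days) + ' '
--             if (i + 1) % 7 == 0:
--                 j += 1
--
--     return weeks[week_num]
-- ===== SOURCE B (Python) =====
-- def week(week_num, start_day, days_in_month):
--     """Return the week_num-th week row of the month: seven 3-char cells,
--     blank before day 1 and after the last day of the month."""
--     offset = start_day - 1          # blank cells before day 1
--     row = ""
--     for i in range(7 * (week_num - 1), 7 * week_num):
--         day = i - offset + 1
--         if day > days_in_month:
--             break
--         row += "   " if day < 1 else "{0:2d} ".format(day)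
--     return row
-- ===== Notes on version B (the rewrite author's own statement) =====
-- stated objective: simpler
-- what changed: B computes only the requested row in a single loop of at most seven cells directly indexed from week_num, instead of building all six rows in a dict while stepping a row counter over the whole grid.
-- intended difference: For start_day >= 8 (not a valid weekday) when the month has enough cells to reach the requested row, A's first row absorbs all leading blanks plus day cells up to its first day cell at grid index congruent to 6 mod 7 (its row counter only advances on day cells), shifting every later row; B lays the grid out in plain rows of seven cells, the intended calendar layout. — e.g. on week(1, 8, 5): A returns " 1 2 3 4 5 ", B returns " "
import Mathlib
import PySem

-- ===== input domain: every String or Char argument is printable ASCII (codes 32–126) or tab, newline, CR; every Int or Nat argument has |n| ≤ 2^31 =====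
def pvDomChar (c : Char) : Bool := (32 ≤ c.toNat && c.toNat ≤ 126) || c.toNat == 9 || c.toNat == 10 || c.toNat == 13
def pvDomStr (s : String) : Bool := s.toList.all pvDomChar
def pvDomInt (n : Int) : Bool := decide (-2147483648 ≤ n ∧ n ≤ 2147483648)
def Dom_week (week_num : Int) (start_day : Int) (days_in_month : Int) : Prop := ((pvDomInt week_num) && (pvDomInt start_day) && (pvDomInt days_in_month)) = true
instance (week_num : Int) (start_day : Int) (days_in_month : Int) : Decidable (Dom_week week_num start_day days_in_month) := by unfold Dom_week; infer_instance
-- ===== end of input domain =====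

-- B computes only the requested row in a single ≤7-cell loop indexed from week_num,
-- instead of building all six rows in a dict while stepping a row counter over the whole grid (objective: simpler).

-- "{0:2d}".format(n): str(n) right-justified to width 2 with spaces (exact hand port; PySem has no rjust)
def fmt2 (n : Int) : String :=
  let s := PySem.Int.toStr n
  if PySem.Str.len s < 2 then " " ++ s else s

-- ===== PORT A =====
def week (week_num : Int) (start_day : Int) (days_in_month : Int) : String :=
  let weeks : PySem.Dict Int String :=
    PySem.Dict.ofList [(1, ""), (2, ""), (3, ""), (4, ""), (5, ""), (6, "")]
  let odd_days := start_day - 2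
  let space := "  "          -- ''.rjust(2, ' ') (exact hand port)
  let st := (PySem.List.pyRange 0 (days_in_month + odd_days + 1) 1).foldl
    (fun (st : PySem.Dict Int String × Int) i =>
      if i ≤ odd_days then
        (st.1.insert st.2 (st.1.getD st.2 "" ++ (space ++ " ")), st.2)
      else
        let d := st.1.insert st.2 (st.1.getD st.2 "" ++ (fmt2 (i - odd_days) ++ " "))
        if PySem.Int.mod (i + 1) 7 = 0 then (d, st.2 + 1) else (d, st.2))
    (weeks, (1 : Int))
  -- weeks[week_num]; the KeyError (week_num not a key, and j running past 6 inside the loop) is excluded by Pre_week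
  st.1.getD week_num ""

-- ===== PORT B =====
-- the for-loop of Source B with its early break, as structural recursion over the index list
def weekAltLoop (offset : Int) (days_in_month : Int) : List Int → String → String
  | [], row => row
  | i :: rest, row =>
    let day := i - offset + 1
    if day > days_in_month then row
    else weekAltLoop offset days_in_month rest
      (row ++ (if day < 1 then "   " else fmt2 day ++ " "))

def week_alt (week_num : Int) (start_day : Int) (days_in_month : Int) : String :=
  let offset := start_day - 1
  weekAltLoop offset days_in_month
    (PySem.List.pyRange (7 * (week_num - 1)) (7 * week_num) 1) ""

-- ===== PRECONDITION & SPEC =====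
-- Pre_week is exactly the set of inputs on which A returns: outside it A raises KeyError
-- (week_num not in 1..6, or the grid running past the 6th row so that weeks[7] is accessed).
def Pre_week (week_num : Int) (start_day : Int) (days_in_month : Int) : Prop :=
  1 ≤ week_num ∧ week_num ≤ 6 ∧
    days_in_month + start_day - 1 ≤
      (max (start_day - 1) 0 + PySem.Int.mod (6 - max (start_day - 1) 0) 7) + 36
instance (week_num : Int) (start_day : Int) (days_in_month : Int) : Decidable (Pre_week week_num start_day days_in_month) := by unfold Pre_week; infer_instance

def pvWitness_week : Int × Int × Int := (2, 4, 30)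

-- For start_day ≥ 8 (not a valid weekday) when the month has enough cells to reach the requested
-- row, A's first row absorbs all leading blanks plus day cells up to its first day cell at grid
-- index ≡ 6 (mod 7) (its row counter only advances on day cells), shifting every later row;
-- B lays the grid out in plain rows of seven cells, the intended calendar layout.
def D_week (week_num : Int) (start_day : Int) (days_in_month : Int) : Prop :=
  8 ≤ start_day ∧ 7 * max (week_num - 1) 1 < days_in_month + start_day - 1
instance (week_num : Int) (start_day : Int) (days_in_month : Int) : Decidable (D_week week_num start_day days_in_month) := by unfold D_week; infer_instance

def Spec_week (week_num : Int) (start_day : Int) (days_in_month : Int) (out : String) : Prop := ¬ D_week week_num start_day days_in_month → out = week_alt week_num start_day days_in_month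
instance (week_num : Int) (start_day : Int) (days_in_month : Int) (out : String) : Decidable (Spec_week week_num start_day days_in_month out) := by unfold Spec_week; infer_instance

def pvDiffWitness_week : Int × Int × Int := (1, 8, 5)
def pvDiffWitnessOut_week : String × String :=
  ("                      1  2  3  4  5 ", "                     ")

-- ===== CLAIM (what is proved, stated in full; the proofs are below) =====
def Claim_unchanged_week : Prop := ∀ (week_num : Int) (start_day : Int) (days_in_month : Int), Dom_week week_num start_day days_in_month → Pre_week week_num start_day days_in_month → Spec_week week_num start_day days_in_month (week week_num start_day days_in_month)
def Claim_changed_week : Prop := Dom_week (pvDiffWitness_week.1) (pvDiffWitness_week.2.1) (pvDiffWitness_week.2.2) ∧ Pre_week (pvDiffWitness_week.1) (pvDiffWitness_week.2.1) (pvDiffWitness_week.2.2) ∧ D_week (pvDiffWitness_week.1) (pvDiffWitness_week.2.1) (pvDiffWitness_week.2.2) ∧ week (pvDiffWitness_week.1) (pvDiffWitness_week.2.1) (pvDiffWitness_week.2.2) = pvDiffWitnessOut_week.1 ∧ week_alt (pvDiffWitness_week.1) (pvDiffWitness_week.2.1) (pvDiffWitness_week.2.2) = pvDiffWitnessOut_week.2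 ∧ pvDiffWitnessOut_week.1 ≠ pvDiffWitnessOut_week.2
def Claim_exact_week : Prop := ∀ (week_num : Int) (start_day : Int) (days_in_month : Int), Dom_week week_num start_day days_in_month → Pre_week week_num start_day days_in_month → D_week week_num start_day days_in_month → week week_num start_day days_in_month ≠ week_alt week_num start_day days_in_month

-- ===== LEMMAS AND PROOFS =====

-- one grid cell: blank before the month starts, else the 2-wide day number, each followed by a space
def cellF (odd i : Int) : String := if i ≤ odd then "   " else fmt2 (i - odd) ++ " "

-- row bounds in A's grid: row 1 is cells [0, brk]; row w ≥ 2 is the next 7 cells each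
def lo6 (brk w : Int) : Int := if w = 1 then 0 else brk + 1 + 7 * (w - 2)
def hi6 (brk w : Int) : Int := if w = 1 then brk + 1 else lo6 brk w + 7

-- row w of A's grid truncated to the first t cells
def rowStr (odd brk w t : Int) : String :=
  (PySem.List.pyRange (lo6 brk w) (min (hi6 brk w) t) 1).foldl (fun out i => out ++ cellF odd i) ""

-- A's row counter j after processing cells 0..n-1
def jf (brk n : Int) : Int := if n ≤ brk then 1 else 2 + (n - brk - 1) / 7

-- the six-row dict with row k holding f k
def dict6 (f : Int → String) : PySem.Dict Int String :=
  PySem.Dict.mk [(1, f 1), (2, f 2), (3, f 3), (4, f 4), (5, f 5), (6, f 6)]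

-- A's loop body
def stepA (odd : Int) (st : PySem.Dict Int String × Int) (i : Int) : PySem.Dict Int String × Int :=
  if i ≤ odd then
    (st.1.insert st.2 (st.1.getD st.2 "" ++ ("  " ++ " ")), st.2)
  else
    let d := st.1.insert st.2 (st.1.getD st.2 "" ++ (fmt2 (i - odd) ++ " "))
    if PySem.Int.mod (i + 1) 7 = 0 then (d, st.2 + 1) else (d, st.2)

lemma dict6_getD (f : Int → String) (j : Int) (h1 : 1 ≤ j) (h6 : j ≤ 6) :
    (dict6 f).getD j "" = f j := by
  interval_cases j <;> rfl

lemma dict6_insert (f : Int → String) (j : Int) (v : String) (h1 : 1 ≤ j) (h6 : j ≤ 6) :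
    (dict6 f).insert j v = dict6 (fun k => if k = j then v else f k) := by
  interval_cases j <;> simp [dict6, PySem.Dict.insert]

lemma dict6_congr (f g : Int → String) (h : ∀ k, 1 ≤ k → k ≤ 6 → f k = g k) :
    dict6 f = dict6 g := by
  unfold dict6
  rw [h 1 (by omega) (by omega), h 2 (by omega) (by omega), h 3 (by omega) (by omega),
      h 4 (by omega) (by omega), h 5 (by omega) (by omega), h 6 (by omega) (by omega)]

lemma jf_bounds (brk n : Int) (hn : n ≤ brk + 35) :
    1 ≤ jf brk n ∧ jf brk n ≤ 6 := by
  unfold jf; split_ifs <;> omega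

lemma seg_iff (brk n k : Int) (h0 : 0 ≤ n) (hn : n < brk + 36)
    (hk1 : 1 ≤ k) (hk6 : k ≤ 6) :
    (lo6 brk k ≤ n ∧ n < hi6 brk k) ↔ k = jf brk n := by
  unfold hi6 lo6 jf; split_ifs <;> omega

lemma rowStr_succ_in (odd brk k n : Int) (hlo : lo6 brk k ≤ n) (hhi : n < hi6 brk k) :
    rowStr odd brk k (n + 1) = rowStr odd brk k n ++ cellF odd n := by
  unfold rowStr
  rw [min_eq_right (by omega : n + 1 ≤ hi6 brk k), min_eq_right (by omega : n ≤ hi6 brk k),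
      PySem.List.pyRange_one_succ_right hlo, List.foldl_append]
  rfl

lemma rowStr_succ_out (odd brk k n : Int) (h : n < lo6 brk k ∨ hi6 brk k ≤ n) :
    rowStr odd brk k (n + 1) = rowStr odd brk k n := by
  unfold rowStr
  rcases h with h | h
  · rw [PySem.List.pyRange_one_eq_nil (by omega : min (hi6 brk k) (n+1) ≤ lo6 brk k),
        PySem.List.pyRange_one_eq_nil (by omega : min (hi6 brk k) n ≤ lo6 brk k)]
  · rw [min_eq_left (by omega : hi6 brk k ≤ n + 1), min_eq_left (by omega : hi6 brk k ≤ n)]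

lemma lo6_nonneg (brk k : Int) (hb : 6 ≤ brk) (h1 : 1 ≤ k) : 0 ≤ lo6 brk k := by
  unfold lo6; split_ifs <;> omega

lemma rowStr_nonpos (odd brk k t : Int) (hb : 6 ≤ brk) (h1 : 1 ≤ k) (ht : t ≤ 0) :
    rowStr odd brk k t = "" := by
  unfold rowStr
  rw [PySem.List.pyRange_one_eq_nil
    (le_trans (min_le_right _ _) (le_trans ht (lo6_nonneg brk k hb h1)))]
  rfl

lemma dict6_step (odd brk n j : Int) (c : String) (hj1 : 1 ≤ j) (hj6 : j ≤ 6)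
    (hc : c = cellF odd n)
    (hrow : ∀ k, 1 ≤ k → k ≤ 6 →
      (if k = j then rowStr odd brk k n ++ cellF odd n else rowStr odd brk k n)
        = rowStr odd brk k (n + 1)) :
    (dict6 fun k => if k = j then rowStr odd brk j n ++ c else rowStr odd brk k n)
      = dict6 (fun k => rowStr odd brk k (n + 1)) := by
  refine dict6_congr _ _ (fun k hk1 hk6 => ?_)
  by_cases hk : k = j
  · subst hk
    rw [if_pos rfl, hc]
    have h := hrow k hk1 hk6
    rw [if_pos rfl] at h
    exact h
  · rw [if_neg hk]
    have h := hrow k hk1 hk6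
    rw [if_neg hk] at h
    exact h

lemma inv_gen (odd brk : Int) (hb : 6 ≤ brk) (hb7 : brk % 7 = 6) (hodd : odd < brk)
    (hmin : brk < max (odd + 1) 0 + 7) (n : Nat) (hn : (n : Int) ≤ brk + 36) :
    (PySem.List.pyRange 0 (n : Int) 1).foldl (stepA odd) (dict6 (fun _ => ""), 1)
      = (dict6 (fun k => rowStr odd brk k (n : Int)), jf brk (n : Int)) := by
  induction n with
  | zero =>
    rw [show ((0 : Nat) : Int) = 0 by norm_num, PySem.List.pyRange_one_eq_nil (le_refl 0)]
    simp only [List.foldl_nil]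
    have h2 : jf brk 0 = 1 := by unfold jf; rw [if_pos (by omega)]
    rw [h2]
    exact congrArg (fun d => (d, (1 : Int)))
      (dict6_congr _ _ (fun k hk1 hk6 => (rowStr_nonpos odd brk k 0 hb hk1 (le_refl 0)).symm))
  | succ n ih =>
    have hcast : ((n + 1 : Nat) : Int) = (n : Int) + 1 := by push_cast; ring
    rw [hcast] at hn ⊢
    have h0n : (0 : Int) ≤ (n : Int) := Int.natCast_nonneg n
    have hn' : (n : Int) ≤ brk + 35 := by omega
    obtain ⟨hj1, hj6⟩ := jf_bounds brk (n : Int) hn'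
    rw [PySem.List.pyRange_one_succ_right h0n, List.foldl_append, ih (by omega)]
    simp only [List.foldl_cons, List.foldl_nil]
    have hrow : ∀ k : Int, 1 ≤ k → k ≤ 6 →
        (if k = jf brk (n : Int)
          then rowStr odd brk k (n : Int) ++ cellF odd (n : Int)
          else rowStr odd brk k (n : Int)) = rowStr odd brk k ((n : Int) + 1) := by
      intro k hk1 hk6
      by_cases hk : k = jf brk (n : Int)
      · rw [if_pos hk]
        obtain ⟨hlo, hhi⟩ := (seg_iff brk (n : Int) k h0n (by omega) hk1 hk6).mpr hk
        exact (rowStr_succ_in odd brk k (n : Int) hlo hhi).symm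
      · rw [if_neg hk]
        have hout : (n : Int) < lo6 brk k ∨ hi6 brk k ≤ (n : Int) := by
          by_contra hc
          exact hk ((seg_iff brk (n : Int) k h0n (by omega) hk1 hk6).mp (by omega))
        exact (rowStr_succ_out odd brk k (n : Int) hout).symm
    have hmod : PySem.Int.mod ((n : Int) + 1) 7 = ((n : Int) + 1) % 7 :=
      PySem.Int.mod_eq_emod_of_pos (by omega)
    unfold stepA
    by_cases hblank : (n : Int) ≤ odd
    · rw [if_pos hblank]
      simp only [dict6_getD _ _ hj1 hj6, dict6_insert _ _ _ hj1 hj6]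
      have hj : jf brk ((n : Int) + 1) = jf brk (n : Int) := by unfold jf; split_ifs <;> omega
      have hc : ("  " ++ " " : String) = cellF odd (n : Int) := by
        unfold cellF; rw [if_pos hblank]; decide
      rw [dict6_step odd brk (n : Int) _ _ hj1 hj6 hc hrow, hj]
    · rw [if_neg hblank]
      simp only [dict6_getD _ _ hj1 hj6, dict6_insert _ _ _ hj1 hj6, hmod]
      have hc : (fmt2 ((n : Int) - odd) ++ " " : String) = cellF odd (n : Int) := by
        unfold cellF; rw [if_neg hblank]
      by_cases h7 : ((n : Int) + 1) % 7 = 0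
      · rw [if_pos h7]
        have hj : jf brk ((n : Int) + 1) = jf brk (n : Int) + 1 := by
          unfold jf; split_ifs <;> omega
        rw [dict6_step odd brk (n : Int) _ _ hj1 hj6 hc hrow, hj]
      · rw [if_neg h7]
        have hj : jf brk ((n : Int) + 1) = jf brk (n : Int) := by
          unfold jf; split_ifs <;> omega
        rw [dict6_step odd brk (n : Int) _ _ hj1 hj6 hc hrow, hj]

-- A's result is row week_num of the grid, truncated at the total cell count
lemma week_eq_rowStr (w sd dim : Int) (hw1 : 1 ≤ w) (hw6 : w ≤ 6)
    (htot : dim + sd - 1 ≤ (max (sd - 1) 0 + PySem.Int.mod (6 - max (sd - 1) 0) 7) + 36) :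
    week w sd dim
      = rowStr (sd - 2) (max (sd - 1) 0 + PySem.Int.mod (6 - max (sd - 1) 0) 7) w
          (dim + sd - 1) := by
  have hA : week w sd dim
      = ((PySem.List.pyRange 0 (dim + (sd - 2) + 1) 1).foldl (stepA (sd - 2))
          (dict6 (fun _ => ""), 1)).1.getD w "" := rfl
  have hm7 : PySem.Int.mod (6 - max (sd - 1) 0) 7 = (6 - max (sd - 1) 0) % 7 :=
    PySem.Int.mod_eq_emod_of_pos (by omega)
  set brk := max (sd - 1) 0 + PySem.Int.mod (6 - max (sd - 1) 0) 7 with hbrk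
  have hbv : brk = max (sd - 1) 0 + (6 - max (sd - 1) 0) % 7 := by rw [hbrk, hm7]
  have hb : 6 ≤ brk := by omega
  have hb7 : brk % 7 = 6 := by omega
  have hodd : sd - 2 < brk := by omega
  have hmin : brk < max (sd - 2 + 1) 0 + 7 := by omega
  have he : dim + (sd - 2) + 1 = dim + sd - 1 := by ring
  by_cases hpos : 0 < dim + sd - 1
  · have hnat : (((dim + sd - 1).toNat : Nat) : Int) = dim + sd - 1 :=
      Int.toNat_of_nonneg (by omega)
    rw [hA, he, ← hnat,
        inv_gen (sd - 2) brk hb hb7 hodd hmin ((dim + sd - 1).toNat) (by omega),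
        dict6_getD _ w hw1 hw6, hnat]
  · rw [hA, he, PySem.List.pyRange_one_eq_nil (by omega),
        rowStr_nonpos (sd - 2) brk w _ hb hw1 (by omega)]
    simp only [List.foldl_nil]
    exact dict6_getD (fun _ => "") w hw1 hw6

-- B's loop with its break is the cell fold over the index range clipped at the total cell count
lemma altLoop_eq (offset dim : Int) : ∀ (n : Nat) (lo hi : Int) (acc : String),
    hi - lo ≤ (n : Int) →
    weekAltLoop offset dim (PySem.List.pyRange lo hi 1) acc
      = (PySem.List.pyRange lo (min hi (dim + offset)) 1).foldl
          (fun o i => o ++ cellF (offset - 1) i) acc := by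
  intro n
  induction n with
  | zero =>
    intro lo hi acc h
    rw [PySem.List.pyRange_one_eq_nil (by omega : hi ≤ lo),
        PySem.List.pyRange_one_eq_nil (by omega : min hi (dim + offset) ≤ lo)]
    rfl
  | succ n ih =>
    intro lo hi acc h
    by_cases hlt : lo < hi
    · rw [PySem.List.pyRange_one_cons hlt]
      show (if lo - offset + 1 > dim then acc
        else weekAltLoop offset dim (PySem.List.pyRange (lo + 1) hi 1)
          (acc ++ (if lo - offset + 1 < 1 then "   " else fmt2 (lo - offset + 1) ++ " "))) = _
      by_cases hbrkc : lo - offset + 1 > dim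
      · rw [if_pos hbrkc,
            PySem.List.pyRange_one_eq_nil (by omega : min hi (dim + offset) ≤ lo)]
        rfl
      · rw [if_neg hbrkc]
        have hcell : (if lo - offset + 1 < 1 then "   " else fmt2 (lo - offset + 1) ++ " ")
            = cellF (offset - 1) lo := by
          unfold cellF
          have : lo - offset + 1 = lo - (offset - 1) := by ring
          rw [this]
          by_cases hb : lo ≤ offset - 1
          · rw [if_pos (by omega : lo - (offset - 1) < 1), if_pos hb]
          · rw [if_neg (by omega : ¬ lo - (offset - 1) < 1), if_neg hb]
        rw [hcell, ih (lo + 1) hi _ (by push_cast at h ⊢; omega),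
            PySem.List.pyRange_one_cons (by omega : lo < min hi (dim + offset))]
        rfl
    · rw [PySem.List.pyRange_one_eq_nil (by omega : hi ≤ lo),
          PySem.List.pyRange_one_eq_nil (by omega : min hi (dim + offset) ≤ lo)]
      rfl

-- B's result in the same cell-fold form
lemma week_alt_eq (w sd dim : Int) :
    week_alt w sd dim
      = (PySem.List.pyRange (7 * (w - 1)) (min (7 * w) (dim + sd - 1)) 1).foldl
          (fun o i => o ++ cellF (sd - 2) i) "" := by
  have h := altLoop_eq (sd - 1) dim (7 * w - 7 * (w - 1)).toNat (7 * (w - 1)) (7 * w) ""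
    (by rw [Int.toNat_of_nonneg (by omega)])
  have h1 : sd - 1 - 1 = sd - 2 := by ring
  have h2 : dim + (sd - 1) = dim + sd - 1 := by ring
  rw [h1, h2] at h
  exact h

-- ===== VERDICT (by name: the statement is the Claim_ definition above) =====
theorem week_spec : Claim_unchanged_week := by
  intro w sd dim _ hpre
  obtain ⟨hw1, hw6, htot⟩ := hpre
  intro hnD
  unfold D_week at hnD
  rw [week_eq_rowStr w sd dim hw1 hw6 htot, week_alt_eq]
  have hm7 : PySem.Int.mod (6 - max (sd - 1) 0) 7 = (6 - max (sd - 1) 0) % 7 :=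
    PySem.Int.mod_eq_emod_of_pos (by omega)
  set brk := max (sd - 1) 0 + PySem.Int.mod (6 - max (sd - 1) 0) 7 with hbrk
  have hbv : brk = max (sd - 1) 0 + (6 - max (sd - 1) 0) % 7 := by rw [hbrk, hm7]
  by_cases hsd : sd ≤ 7
  · -- start_day a real weekday (or below): A's rows are exactly rows of seven
    have hbrk6 : brk = 6 := by omega
    have hlo : lo6 brk w = 7 * (w - 1) := by unfold lo6; split_ifs <;> omega
    have hhi : hi6 brk w = 7 * w := by unfold hi6 lo6; split_ifs <;> omega
    unfold rowStr
    rw [hlo, hhi]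
  · -- start_day ≥ 8 and ¬D: the grid ends before the requested row can differ
    have hT : dim + sd - 1 ≤ 7 * max (w - 1) 1 := by
      by_contra hc
      exact hnD ⟨by omega, by omega⟩
    have hbge : sd - 1 ≤ brk := by omega
    by_cases hw : w = 1
    · subst hw
      have hTle : dim + sd - 1 ≤ 7 := by omega
      have hlo : lo6 brk 1 = 0 := by unfold lo6; rw [if_pos rfl]
      have hhi : hi6 brk 1 = brk + 1 := by unfold hi6; rw [if_pos rfl]
      unfold rowStr
      rw [hlo, hhi, min_eq_right (by omega : dim + sd - 1 ≤ brk + 1),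
          min_eq_right (by omega : dim + sd - 1 ≤ 7 * 1)]
      norm_num
    · -- w ≥ 2: both rows empty
      have hTle : dim + sd - 1 ≤ 7 * (w - 1) := by
        have : max (w - 1) 1 = w - 1 := by omega
        omega
      have hloA : lo6 brk w = brk + 1 + 7 * (w - 2) := by unfold lo6; rw [if_neg hw]
      unfold rowStr
      rw [PySem.List.pyRange_one_eq_nil
            (by rw [hloA]; omega : min (hi6 brk w) (dim + sd - 1) ≤ lo6 brk w),
          PySem.List.pyRange_one_eq_nil
            (by omega : min (7 * w) (dim + sd - 1) ≤ 7 * (w - 1))]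

theorem week_changed : Claim_changed_week := by
  unfold Claim_changed_week; decide

-- ===== helpers for the tightness proof =====
lemma fmt2_len (n : Int) (h1 : 1 ≤ n) (h2 : n ≤ 36) : (fmt2 n).toList.length = 2 := by
  interval_cases n <;> decide

lemma fmt2_ne_spaces (n : Int) (h1 : 1 ≤ n) (h2 : n ≤ 36) : (fmt2 n).toList ≠ [' ', ' '] := by
  interval_cases n <;> decide

lemma fmt2_inj (a b : Int) (ha1 : 1 ≤ a) (ha2 : a ≤ 36) (hb1 : 1 ≤ b) (hb2 : b ≤ 36)
    (h : (fmt2 a).toList = (fmt2 b).toList) : a = b := by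
  interval_cases a <;> interval_cases b <;> revert h <;> decide

lemma foldl_cell_toList (f : Int → String) (l : List Int) (acc : String) :
    (l.foldl (fun o i => o ++ f i) acc).toList
      = acc.toList ++ l.flatMap (fun i => (f i).toList) := by
  induction l generalizing acc with
  | nil => simp
  | cons x xs ih =>
    rw [List.foldl_cons, ih, List.flatMap_cons, String.toList_append, List.append_assoc]

lemma cell_toList_ne_nil (odd i : Int) : (cellF odd i).toList ≠ [] := by
  unfold cellF
  split_ifs
  · decide
  · rw [String.toList_append]
    simp

theorem week_tight : Claim_exact_week := by
  intro w sd dim _ hpre hD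
  obtain ⟨hw1, hw6, htot⟩ := hpre
  obtain ⟨hsd8, hT⟩ := hD
  rw [week_eq_rowStr w sd dim hw1 hw6 htot, week_alt_eq]
  have hm7 : PySem.Int.mod (6 - max (sd - 1) 0) 7 = (6 - max (sd - 1) 0) % 7 :=
    PySem.Int.mod_eq_emod_of_pos (by omega)
  set brk := max (sd - 1) 0 + PySem.Int.mod (6 - max (sd - 1) 0) 7 with hbrk
  have hbv : brk = max (sd - 1) 0 + (6 - max (sd - 1) 0) % 7 := by rw [hbrk, hm7]
  have hbl : sd - 1 ≤ brk := by omega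
  have hbu : brk ≤ sd + 5 := by omega
  intro heq
  have hL := congrArg String.toList heq
  unfold rowStr at hL
  rw [foldl_cell_toList, foldl_cell_toList] at hL
  simp only [String.toList_empty, List.nil_append] at hL
  by_cases hw : w = 1
  · subst hw
    have hT8 : 8 ≤ dim + sd - 1 := by omega
    have hlo : lo6 brk 1 = 0 := by unfold lo6; rw [if_pos rfl]
    have hhi : hi6 brk 1 = brk + 1 := by unfold hi6; rw [if_pos rfl]
    rw [hlo, hhi, show (7 : Int) * (1 - 1) = 0 by norm_num, show (7 : Int) * 1 = 7 by norm_num,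
        min_eq_left (by omega : (7 : Int) ≤ dim + sd - 1),
        PySem.List.pyRange_one_append 0 7 (min (brk + 1) (dim + sd - 1))
          (by omega) (by omega : (7 : Int) ≤ min (brk + 1) (dim + sd - 1)),
        List.flatMap_append] at hL
    have hx := congrArg List.length hL
    rw [List.length_append] at hx
    have hnil : (PySem.List.pyRange 7 (min (brk + 1) (dim + sd - 1)) 1).flatMap
        (fun i => (cellF (sd - 2) i).toList) = [] :=
      List.eq_nil_of_length_eq_zero (by omega)
    rw [PySem.List.pyRange_one_cons (by omega : (7 : Int) < min (brk + 1) (dim + sd - 1)),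
        List.flatMap_cons] at hnil
    rcases List.append_eq_nil_iff.mp hnil with ⟨hc, -⟩
    exact cell_toList_ne_nil (sd - 2) 7 hc
  · have hmax : max (w - 1) 1 = w - 1 := by omega
    have hT7 : 7 * (w - 1) < dim + sd - 1 := by omega
    have hlo6 : lo6 brk w = brk + 1 + 7 * (w - 2) := by unfold lo6; rw [if_neg hw]
    have hhi6 : hi6 brk w = brk + 1 + 7 * (w - 2) + 7 := by unfold hi6 lo6; rw [if_neg hw, if_neg hw]
    rw [PySem.List.pyRange_one_cons
          (by omega : 7 * (w - 1) < min (7 * w) (dim + sd - 1)), List.flatMap_cons] at hL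
    by_cases hTa : dim + sd - 1 ≤ lo6 brk w
    · rw [PySem.List.pyRange_one_eq_nil (by omega : min (hi6 brk w) (dim + sd - 1) ≤ lo6 brk w)] at hL
      rcases List.append_eq_nil_iff.mp hL.symm with ⟨hc, -⟩
      exact cell_toList_ne_nil (sd - 2) (7 * (w - 1)) hc
    · rw [hlo6] at hTa
      rw [hlo6, hhi6] at hL
      rw [PySem.List.pyRange_one_cons
            (by omega : brk + 1 + 7 * (w - 2) < min (brk + 1 + 7 * (w - 2) + 7) (dim + sd - 1)),
          List.flatMap_cons] at hL
      -- first cells of both rows are three characters wide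
      have hdA1 : 2 ≤ brk + 1 + 7 * (w - 2) - (sd - 2) := by omega
      have hdA2 : brk + 1 + 7 * (w - 2) - (sd - 2) ≤ 36 := by omega
      have lenA : (cellF (sd - 2) (brk + 1 + 7 * (w - 2))).toList.length = 3 := by
        unfold cellF
        rw [if_neg (by omega : ¬ brk + 1 + 7 * (w - 2) ≤ sd - 2), String.toList_append,
            List.length_append, fmt2_len _ (by omega) (by omega)]
        rfl
      have hLA : (cellF (sd - 2) (brk + 1 + 7 * (w - 2))).toList
          = (fmt2 (brk + 1 + 7 * (w - 2) - (sd - 2))).toList ++ [' '] := by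
        unfold cellF
        rw [if_neg (by omega : ¬ brk + 1 + 7 * (w - 2) ≤ sd - 2), String.toList_append]
        rfl
      by_cases hblankB : 7 * (w - 1) ≤ sd - 2
      · -- B's first cell is blank, A's carries a day number
        have lenB : (cellF (sd - 2) (7 * (w - 1))).toList.length = 3 := by
          unfold cellF; rw [if_pos hblankB]; rfl
        have hc := (List.append_inj hL (lenA.trans lenB.symm)).1
        rw [hLA] at hc
        have hcb : (cellF (sd - 2) (7 * (w - 1))).toList = [' ', ' '] ++ [' '] := by
          unfold cellF; rw [if_pos hblankB]; rfl
        rw [hcb] at hc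
        have := (List.append_inj' hc rfl).1
        exact fmt2_ne_spaces _ (by omega) (by omega) this
      · -- both first cells carry day numbers; the numbers differ
        have hdB1 : 1 ≤ 7 * (w - 1) - (sd - 2) := by omega
        have hdB2 : 7 * (w - 1) - (sd - 2) ≤ 36 := by omega
        have lenB : (cellF (sd - 2) (7 * (w - 1))).toList.length = 3 := by
          unfold cellF
          rw [if_neg hblankB, String.toList_append, List.length_append,
              fmt2_len _ (by omega) (by omega)]
          rfl
        have hc := (List.append_inj hL (lenA.trans lenB.symm)).1
        rw [hLA] at hc
        have hcb : (cellF (sd - 2) (7 * (w - 1))).toList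
            = (fmt2 (7 * (w - 1) - (sd - 2))).toList ++ [' '] := by
          unfold cellF; rw [if_neg hblankB, String.toList_append]; rfl
        rw [hcb] at hc
        have hfe := (List.append_inj' hc rfl).1
        have := fmt2_inj _ _ (by omega) (by omega) (by omega) (by omega) hfe
        omega
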